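-- pv_equiv track=rewrite | github.com/MC-and-his-Agents/Syvert | syvert/adapter_provider_compatibility_decision.py | _identity_slug
-- ===== SOURCE A (Python) =====
-- def _identity_slug(raw_value: str) -> str:
--     chars: list[str] = []
--     previous_was_separator = False
--     for char in raw_value.lower():
--         if char.isalnum():
--             chars.append(char)
--             previous_was_separator = False
--         elif not previous_was_separator:
--             chars.append("-")
--             previous_was_separator = True
--     return "".join(chars).strip("-")
-- ===== SOURCE B (Python) =====
-- from itertools import groupby
--
--
-- def _identity_slug(raw_value: str) -> str:
--     parts = []
--     for is_word, group in groupby(raw_value.lower(), key=str.isalnum):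
--         parts.append("".join(group) if is_word else "-")
--     return "".join(parts).strip("-")
-- ===== Notes on version B (the rewrite author's own statement) =====
-- stated objective: idiomatic
-- what changed: Replaced A's per-character previous_was_separator state machine with itertools.groupby run-segmentation keyed on str.isalnum: alnum runs are joined and kept, each non-alnum run contributes a single dash.
import Mathlib
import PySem

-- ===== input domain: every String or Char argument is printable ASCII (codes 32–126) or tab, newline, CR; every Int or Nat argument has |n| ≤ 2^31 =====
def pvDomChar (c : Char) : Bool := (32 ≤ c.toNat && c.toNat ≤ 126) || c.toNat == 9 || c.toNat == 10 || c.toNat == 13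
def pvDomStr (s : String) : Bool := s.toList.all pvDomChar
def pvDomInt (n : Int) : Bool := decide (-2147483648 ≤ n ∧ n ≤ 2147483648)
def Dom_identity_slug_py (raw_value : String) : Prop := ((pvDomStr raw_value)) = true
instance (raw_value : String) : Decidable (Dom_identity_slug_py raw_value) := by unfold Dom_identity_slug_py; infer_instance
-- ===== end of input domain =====

-- B replaces A's per-character previous_was_separator state machine by itertools.groupby run-segmentation
-- (alnum runs kept, each non-alnum run collapsed to one dash); objective: idiomatic, same single-pass cost.

-- ===== PORT A =====
-- state = (chars accumulated so far, previous_was_separator)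
def identity_slug_py (raw_value : String) : String :=
  let st := (PySem.Str.lower raw_value).toList.foldl
    (fun (s : List Char × Bool) char =>
      if PySem.Chars.isalnum char then (s.1 ++ [char], false)
      else if !s.2 then (s.1 ++ ['-'], true)
      else s)
    ([], false)
  PySem.Str.stripChars (String.mk st.1) "-"

-- ===== PORT B =====
-- groupby(key=str.isalnum): peel one maximal run of equal key at a time;
-- the run is joined and kept if the key is True, else it contributes a single dash
def slugRuns : List Char → List Char
  | [] => []
  | c :: rest =>
    (if PySem.Chars.isalnum c then
        (c :: rest).takeWhile (fun d => PySem.Chars.isalnum d == PySem.Chars.isalnum c)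
      else ['-'])
    ++ slugRuns ((c :: rest).dropWhile (fun d => PySem.Chars.isalnum d == PySem.Chars.isalnum c))
  termination_by cs => cs.length
  decreasing_by
    simp only [List.dropWhile_cons, beq_self_eq_true, if_true]
    exact Nat.lt_succ_of_le (List.length_dropWhile_le _ _)

def identity_slug_py_alt (raw_value : String) : String :=
  PySem.Str.stripChars (String.mk (slugRuns (PySem.Str.lower raw_value).toList)) "-"

-- ===== PRECONDITION & SPEC =====
def Spec_identity_slug_py (raw_value : String) (out : String) : Prop := out = identity_slug_py_alt raw_value
instance (raw_value : String) (out : String) : Decidable (Spec_identity_slug_py raw_value out) := by unfold Spec_identity_slug_py; infer_instance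

-- ===== CLAIM (what is proved, stated in full; the proofs are below) =====
def Claim_equal_identity_slug_py : Prop := ∀ (raw_value : String), Dom_identity_slug_py raw_value → Spec_identity_slug_py raw_value (identity_slug_py raw_value)

-- ===== LEMMAS AND PROOFS =====

-- the characters A's state machine emits on the remaining input, given previous_was_separator
def outSM : List Char → Bool → List Char
  | [], _ => []
  | c :: rest, prev =>
    if PySem.Chars.isalnum c then c :: outSM rest false
    else if !prev then '-' :: outSM rest true
    else outSM rest prev

theorem outSM_cons (c : Char) (rest : List Char) (prev : Bool) :
    outSM (c :: rest) prev = if PySem.Chars.isalnum c then c :: outSM rest false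
      else if !prev then '-' :: outSM rest true else outSM rest prev := rfl

theorem foldl_outSM (cs : List Char) : ∀ (acc : List Char) (prev : Bool),
    (cs.foldl
      (fun (s : List Char × Bool) char =>
        if PySem.Chars.isalnum char then (s.1 ++ [char], false)
        else if !s.2 then (s.1 ++ ['-'], true)
        else s)
      (acc, prev)).1 = acc ++ outSM cs prev := by
  induction cs with
  | nil => intro acc prev; simp [outSM]
  | cons c rest ih =>
    intro acc prev
    rw [List.foldl_cons]
    simp only [outSM]
    by_cases h : PySem.Chars.isalnum c = true
    · rw [if_pos h, if_pos h, ih]; simp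
    · rw [if_neg h, if_neg h]
      cases prev with
      | false => rw [if_pos (by simp), if_pos (by simp), ih]; simp
      | true => rw [if_neg (by simp), if_neg (by simp), ih]

theorem outSM_true_skip (run tail : List Char) (h : ∀ c ∈ run, PySem.Chars.isalnum c = false) :
    outSM (run ++ tail) true = outSM tail true := by
  induction run with
  | nil => rfl
  | cons c rest ih =>
    rw [List.cons_append]
    simp only [outSM]
    rw [if_neg (by simp [h c List.mem_cons_self]), if_neg (by simp)]
    exact ih (fun d hd => h d (List.mem_cons_of_mem _ hd))

theorem outSM_alnum_prefix (run tail : List Char) (h : ∀ c ∈ run, PySem.Chars.isalnum c = true) :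
    outSM (run ++ tail) false = run ++ outSM tail false := by
  induction run with
  | nil => rfl
  | cons c rest ih =>
    rw [List.cons_append]
    simp only [outSM]
    rw [if_pos (h c List.mem_cons_self), ih (fun d hd => h d (List.mem_cons_of_mem _ hd))]
    rfl

theorem outSM_head_alnum (tail : List Char)
    (h : tail = [] ∨ ∃ d rest, tail = d :: rest ∧ PySem.Chars.isalnum d = true) :
    outSM tail true = outSM tail false := by
  rcases h with h | ⟨d, rest, rfl, hd⟩
  · subst h; rfl
  · simp [outSM, hd]

theorem slugRuns_eq_outSM (cs : List Char) : slugRuns cs = outSM cs false := by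
  induction cs using slugRuns.induct with
  | case1 => simp [slugRuns, outSM]
  | case2 c rest ih =>
    rw [slugRuns]
    set p := fun d => PySem.Chars.isalnum d == PySem.Chars.isalnum c with hp
    set run := (c :: rest).takeWhile p with hrun
    set tail := (c :: rest).dropWhile p with htail
    have hsplit : run ++ tail = c :: rest := List.takeWhile_append_dropWhile
    have hmem : ∀ d ∈ run, PySem.Chars.isalnum d = PySem.Chars.isalnum c := fun d hd => by
      have := List.mem_takeWhile_imp hd; simpa [hp] using this
    have hhead : tail = [] ∨ ∃ d rest', tail = d :: rest' ∧
        PySem.Chars.isalnum d ≠ PySem.Chars.isalnum c := by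
      cases htl : tail with
      | nil => exact Or.inl rfl
      | cons d rest' =>
        refine Or.inr ⟨d, rest', rfl, ?_⟩
        have h2 := List.head?_dropWhile_not p (c :: rest)
        rw [← htail, htl] at h2
        simpa [hp] using h2
    by_cases hk : PySem.Chars.isalnum c = true
    · rw [if_pos hk, ih, ← hsplit,
        outSM_alnum_prefix run tail (fun d hd => (hmem d hd).trans hk)]
    · have hkf : PySem.Chars.isalnum c = false := by simpa using hk
      have hcrun : run = c :: rest.takeWhile p := by
        rw [hrun, List.takeWhile_cons, if_pos (by simp [hp])]
      rw [if_neg hk, ih, ← hsplit, hcrun, List.cons_append, List.cons_append, outSM_cons c (List.takeWhile p rest ++ tail) false]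
      rw [if_neg (by simp [hkf]), if_pos (by simp),
        outSM_true_skip _ tail (fun d hd => by
          have hdr : d ∈ run := by rw [hcrun]; exact List.mem_cons_of_mem _ hd
          rw [hmem d hdr, hkf]),
        outSM_head_alnum tail (by
          rcases hhead with h | ⟨d, rest', htl, hd⟩
          · exact Or.inl h
          · refine Or.inr ⟨d, rest', htl, ?_⟩
            cases hdd : PySem.Chars.isalnum d with
            | false => exact absurd (hdd.trans hkf.symm) hd
            | true => rfl)]
      rfl

-- ===== VERDICT (by name: the statement is the Claim_ definition above) =====
theorem identity_slug_py_spec : Claim_equal_identity_slug_py := by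
  intro raw_value _
  show PySem.Str.stripChars (String.mk ((PySem.Str.lower raw_value).toList.foldl
      (fun (s : List Char × Bool) char =>
        if PySem.Chars.isalnum char then (s.1 ++ [char], false)
        else if !s.2 then (s.1 ++ ['-'], true)
        else s)
      ([], false)).1) "-" = identity_slug_py_alt raw_value
  rw [foldl_outSM]
  unfold identity_slug_py_alt
  rw [slugRuns_eq_outSM]
  rfl
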